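-- pv_equiv track=rewrite | github.com/heinrich5991/libtw2 | map/src/generate.py | generate_impl_map_item
-- ===== SOURCE A (Python) =====
-- def struct_name(name, i):
--     return "MapItem{}V{}".format(name.title().replace('_', ''), i + 1)
--
-- def generate_impl_map_item(items):
--     result = []
--     for (_, name, versions) in items:
--         offset = 1
--         for (i, version) in enumerate(versions):
--             result.append("impl MapItem for {s} {{ fn version() -> i32 {{ {v} }} fn offset() -> usize {{ {o} }} }}".format(s=struct_name(name, i), v=i+1, o=offset))
--             for (_, size, _) in version:
--                 if size is None:
--                     offset += 1
--                 else:
--                     offset += size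
--     result.append("")
--     return "\n".join(result)
-- ===== SOURCE B (Python) =====
-- def struct_name(name, i):
--     return "MapItem{}V{}".format(name.title().replace('_', ''), i + 1)
--
-- def generate_impl_map_item(items):
--     def vsize(version):
--         return sum(1 if size is None else size for _, size, _ in version)
--     lines = [
--         "impl MapItem for {s} {{ fn version() -> i32 {{ {v} }} fn offset() -> usize {{ {o} }} }}".format(
--             s=struct_name(name, i), v=i + 1, o=1 + sum(vsize(v) for v in versions[:i]))
--         for _, name, versions in items
--         for i in range(len(versions))
--     ]
--     return "\n".join(lines + [""])
-- ===== Notes on version B (the rewrite author's own statement) =====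
-- stated objective: alternative
-- what changed: B drops A's running-offset accumulator entirely: it emits every line from a single flat comprehension over (item, version-index), computing each offset by the closed form 1 + sum of the field sizes of the earlier versions (versions[:i]).
import Mathlib
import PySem

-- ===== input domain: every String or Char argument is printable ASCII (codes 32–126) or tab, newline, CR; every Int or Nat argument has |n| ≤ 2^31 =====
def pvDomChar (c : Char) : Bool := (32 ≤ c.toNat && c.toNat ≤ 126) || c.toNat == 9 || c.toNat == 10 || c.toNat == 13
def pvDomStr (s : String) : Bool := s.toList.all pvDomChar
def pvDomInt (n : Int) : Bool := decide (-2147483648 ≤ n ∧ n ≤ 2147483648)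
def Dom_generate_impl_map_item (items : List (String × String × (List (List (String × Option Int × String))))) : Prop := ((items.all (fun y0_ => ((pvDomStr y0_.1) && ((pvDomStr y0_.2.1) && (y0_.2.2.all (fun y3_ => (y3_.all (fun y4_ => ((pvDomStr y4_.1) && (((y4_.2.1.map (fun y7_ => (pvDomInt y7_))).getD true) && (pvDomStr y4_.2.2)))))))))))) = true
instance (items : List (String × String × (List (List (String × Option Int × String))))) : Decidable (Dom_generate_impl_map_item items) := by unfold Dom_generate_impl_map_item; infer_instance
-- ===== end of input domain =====

-- B removes A's running-offset accumulator: one flat comprehension over (item, version index),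
-- each offset computed by the closed form 1 + sum of field sizes of versions[:i] (objective: alternative).

-- ===== common helpers (both Pythons contain the identical `struct_name` and format string) =====
-- hand port of Python str.title(); exact on the ASCII domain (cased character = ASCII letter)
def pyTitleAux : Bool → List Char → List Char
  | _, [] => []
  | prev, c :: cs =>
    (if PySem.Chars.isalpha c then
       (if prev then PySem.Chars.lowerChar c else PySem.Chars.upperChar c)
     else c) :: pyTitleAux (PySem.Chars.isalpha c) cs

def pyTitle (s : String) : String := String.ofList (pyTitleAux false s.toList)

def structName (name : String) (i : Int) : String :=
  "MapItem" ++ PySem.Str.replace (pyTitle name) "_" "" ++ "V" ++ PySem.Int.toStr (i + 1)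

def implLine (s : String) (v o : Int) : String :=
  "impl MapItem for " ++ s ++ " { fn version() -> i32 { " ++ PySem.Int.toStr v ++
    " } fn offset() -> usize { " ++ PySem.Int.toStr o ++ " } }"

-- ===== PORT A =====
def generate_impl_map_item (items : List (String × String × (List (List (String × Option Int × String))))) : String :=
  let result := items.foldl (fun result item =>
    match item with
    | (_, name, versions) =>
      ((PySem.List.enumerate versions 0).foldl
        (fun (st : List String × Int) iv =>
          match iv with
          | (i, version) =>
            let result := st.1 ++ [implLine (structName name i) (i + 1) st.2]
            let offset := version.foldl
              (fun off (f : String × Option Int × String) =>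
                match f.2.1 with
                | none => off + 1
                | some s => off + s) st.2
            (result, offset))
        (result, (1 : Int))).1) ([] : List String)
  PySem.Str.join "\n" (result ++ [""])

-- ===== PORT B =====
def fieldSize (f : String × Option Int × String) : Int :=
  match f.2.1 with
  | none => 1
  | some s => s

def versionSize (version : List (String × Option Int × String)) : Int :=
  (version.map fieldSize).sum

-- Source B's flat comprehension: `versions[:i]` with 0 ≤ i ≤ len is exactly List.take i
def generate_impl_map_item_alt (items : List (String × String × (List (List (String × Option Int × String))))) : String :=
  let lines := items.flatMap (fun item =>
    match item with
    | (_, name, versions) =>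
      (List.range versions.length).map (fun (i : Nat) =>
        implLine (structName name (i : Int)) ((i : Int) + 1)
          (1 + ((versions.take i).map versionSize).sum)))
  PySem.Str.join "\n" (lines ++ [""])

-- ===== PRECONDITION & SPEC =====
def Spec_generate_impl_map_item (items : List (String × String × (List (List (String × Option Int × String))))) (out : String) : Prop := out = generate_impl_map_item_alt items
instance (items : List (String × String × (List (List (String × Option Int × String))))) (out : String) : Decidable (Spec_generate_impl_map_item items out) := by unfold Spec_generate_impl_map_item; infer_instance

-- ===== CLAIM (what is proved, stated in full; the proofs are below) =====
def Claim_equal_generate_impl_map_item : Prop := ∀ (items : List (String × String × (List (List (String × Option Int × String))))), Dom_generate_impl_map_item items → Spec_generate_impl_map_item items (generate_impl_map_item items)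

-- ===== LEMMAS AND PROOFS =====

-- A's inner field loop adds exactly the version's total field size
lemma fields_fold (version : List (String × Option Int × String)) (t : Int) :
    version.foldl (fun off f => match f.2.1 with | none => off + 1 | some s => off + s) t
      = t + versionSize version := by
  induction version generalizing t with
  | nil => simp [versionSize]
  | cons f rest ih =>
    cases h : f.2.1 with
    | none => simp only [List.foldl_cons, h, ih, versionSize, List.map_cons, List.sum_cons, fieldSize]; ring
    | some s => simp only [List.foldl_cons, h, ih, versionSize, List.map_cons, List.sum_cons, fieldSize]; ring

-- A's per-version loop body, with the field loop collapsed to versionSize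
lemma stepA_eq (name : String) :
    (fun (st : List String × Int) (iv : Int × List (String × Option Int × String)) =>
      match iv with
      | (i, version) =>
        let result := st.1 ++ [implLine (structName name i) (i + 1) st.2]
        let offset := version.foldl
          (fun off (f : String × Option Int × String) =>
            match f.2.1 with
            | none => off + 1
            | some s => off + s) st.2
        (result, offset))
    = (fun (st : List String × Int) (iv : Int × List (String × Option Int × String)) =>
        (st.1 ++ [implLine (structName name iv.1) (iv.1 + 1) st.2], st.2 + versionSize iv.2)) := by
  funext st iv
  obtain ⟨i, version⟩ := iv
  simp [fields_fold]

-- A's interleaved enumerate-loop equals B's closed-form map: the accumulated offset at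
-- version index k+j, starting from t at prefix-position k, is t + Σ sizes of take j
lemma inner_eq (name : String) :
    ∀ (vs : List (List (String × Option Int × String))) (k : Nat) (t : Int) (acc : List String),
      ((PySem.List.enumerate vs (k : Int)).foldl
        (fun (st : List String × Int) (iv : Int × List (String × Option Int × String)) =>
          (st.1 ++ [implLine (structName name iv.1) (iv.1 + 1) st.2], st.2 + versionSize iv.2))
        (acc, t)).1
      = acc ++ (List.range vs.length).map (fun j =>
          implLine (structName name ((k + j : Nat) : Int)) (((k + j : Nat) : Int) + 1)
            (t + ((vs.take j).map versionSize).sum)) := by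
  intro vs
  induction vs with
  | nil => intro k t acc; simp [PySem.List.enumerate_nil]
  | cons v rest ih =>
    intro k t acc
    simp only [PySem.List.enumerate_cons, List.foldl_cons, List.length_cons]
    have h := ih (k + 1) (t + versionSize v) (acc ++ [implLine (structName name (k : Int)) ((k : Int) + 1) t])
    push_cast at h
    rw [h, List.range_succ_eq_map, List.map_cons, List.map_map, List.append_assoc, List.singleton_append]
    refine congrArg (fun l => acc ++ l) ?_
    refine congrArg₂ List.cons ?_ ?_
    · simp only [List.take_zero, List.map_nil, List.sum_nil, add_zero]
    · refine List.map_congr_left ?_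
      intro j hj
      simp only [Function.comp_apply, List.take_succ_cons, List.map_cons, List.sum_cons]
      push_cast [Nat.succ_eq_add_one]
      ring_nf

-- ===== VERDICT (by name: the statement is the Claim_ definition above) =====
theorem generate_impl_map_item_spec : Claim_equal_generate_impl_map_item := by
  intro items _
  unfold Spec_generate_impl_map_item generate_impl_map_item generate_impl_map_item_alt
  simp only []
  congr 1
  congr 1
  trans (items.foldl (fun acc item => acc ++ (List.range item.2.2.length).map (fun (i : Nat) =>
      implLine (structName item.2.1 (i : Int)) ((i : Int) + 1)
        (1 + ((item.2.2.take i).map versionSize).sum))) [])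
  · apply PySem.List.foldl_congr_mem
    intro acc item _
    obtain ⟨tid, name, versions⟩ := item
    simp only []
    rw [stepA_eq name]
    have h := inner_eq name versions 0 1 acc
    simpa using h
  · rw [PySem.List.foldl_append_eq_flatMap]
    simp
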